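-- pv_equiv track=rewrite | github.com/acg-team/swissrepeats | src/homorepeat_counts.py | count_homorepeats_in_seq
-- ===== SOURCE A (Python) =====
-- def count_homorepeats_in_seq(result_dict, sequence, extreme=10):
--     extremes = []
--     current = sequence[0]
--     count = 1
--     for char in sequence[1:]:
--         if char == current:
--             count += 1
--         else:
--             result_dict[current][count] += 1
--             if count >= extreme:
--                 extremes.append((current, count))
--             current = char
--             count = 1
--     if count >= extreme:
--         extremes.append((current, count))
--     result_dict[current][count] += 1
--     return extremes
-- ===== SOURCE B (Python) =====
-- def count_homorepeats_in_seq(result_dict, sequence, extreme=10):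
--     n = len(sequence)
--     breaks = [0] + [i + 1 for i, (a, b) in enumerate(zip(sequence, sequence[1:])) if a != b] + [n]
--     runs = [(sequence[s], e - s) for s, e in zip(breaks, breaks[1:])]
--     for char, length in runs:
--         result_dict[char][length] += 1
--     return [run for run in runs if run[1] >= extreme]
-- ===== Notes on version B (the rewrite author's own statement) =====
-- stated objective: alternative
-- what changed: Replaced A's single-pass current/count state machine by a staged boundary-index construction: first compute the list of run boundaries by comparing adjacent characters (zip of the sequence with its shift), then build the (char, length) runs from consecutive boundary pairs, update the dict in a separate pass, and obtain the extremes as a final filter comprehension.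
import Mathlib
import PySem

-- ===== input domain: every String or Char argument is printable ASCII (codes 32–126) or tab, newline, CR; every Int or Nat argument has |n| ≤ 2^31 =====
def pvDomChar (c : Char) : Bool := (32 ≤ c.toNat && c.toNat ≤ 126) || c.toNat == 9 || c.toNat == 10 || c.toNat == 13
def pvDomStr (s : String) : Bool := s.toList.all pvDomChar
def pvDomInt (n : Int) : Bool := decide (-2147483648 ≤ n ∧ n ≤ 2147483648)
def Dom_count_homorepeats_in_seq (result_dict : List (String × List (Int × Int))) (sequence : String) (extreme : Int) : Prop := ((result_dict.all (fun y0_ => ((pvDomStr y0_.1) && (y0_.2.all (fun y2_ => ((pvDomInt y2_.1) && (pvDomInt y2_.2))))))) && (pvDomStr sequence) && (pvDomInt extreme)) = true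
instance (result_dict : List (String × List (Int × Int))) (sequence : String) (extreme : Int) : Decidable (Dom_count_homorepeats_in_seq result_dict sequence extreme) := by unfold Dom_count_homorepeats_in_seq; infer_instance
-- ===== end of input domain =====

-- B replaces A's single-pass current/count state machine by staged passes: a boundary-index
-- list built from adjacent-character comparisons, runs from consecutive boundary pairs, a
-- separate dict-update pass, and a final filter for the extremes — alternative decomposition,
-- same cost. A mutates result_dict in place; B performs the same mutation, but the
-- equivalence proved here is about the RETURN value (the list of extremes).


-- ===== PORT A =====
-- association-list update of the first entry with the given key (Python '+= 1' on an existing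
-- dict key; a missing key is a KeyError in Python and is excluded by Pre_, so the no-op of
-- pvAssocModify on a missing key is never reached inside the claim)
def pvAssocModify {α β : Type} [BEq α] (f : β → β) : List (α × β) → α → List (α × β)
  | [], _ => []
  | p :: rest, k => if p.1 == k then (p.1, f p.2) :: rest else p :: pvAssocModify f rest k

-- result_dict[current][count] += 1
def pvBump (rd : List (String × List (Int × Int))) (cur : String) (cnt : Int) : List (String × List (Int × Int)) :=
  pvAssocModify (fun inner => pvAssocModify (· + 1) inner cnt) rd cur

-- one iteration of A's for-loop; state = (result_dict, current, count, extremes)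
def pvStepA (extreme : Int) (st : (List (String × List (Int × Int))) × String × Int × List (String × Int)) (char : Char) : (List (String × List (Int × Int))) × String × Int × List (String × Int) :=
  if String.ofList [char] == st.2.1 then (st.1, st.2.1, st.2.2.1 + 1, st.2.2.2)
  else (pvBump st.1 st.2.1 st.2.2.1, String.ofList [char], 1,
        if st.2.2.1 ≥ extreme then st.2.2.2 ++ [(st.2.1, st.2.2.1)] else st.2.2.2)

-- literal port of A; 'sequence[0]' raises IndexError on the empty sequence (excluded by Pre_)
def count_homorepeats_in_seq (result_dict : List (String × List (Int × Int))) (sequence : String) (extreme : Int) : List (String × Int) :=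
  match sequence.toList with
  | [] => []
  | c :: rest =>
    let fin := rest.foldl (pvStepA extreme) (result_dict, String.ofList [c], 1, ([] : List (String × Int)))
    let extremes := if fin.2.2.1 ≥ extreme then fin.2.2.2 ++ [(fin.2.1, fin.2.2.1)] else fin.2.2.2
    let _ := pvBump fin.1 fin.2.1 fin.2.2.1   -- final result_dict[current][count] += 1 (mutation only)
    extremes

-- ===== PORT B =====
-- literal port of B (Source B): breaks = [0] + [i+1 for i,(a,b) in enumerate(zip(seq, seq[1:])) if a != b] + [n];
-- runs from consecutive boundary pairs; a dict-update pass; extremes = filter of runs.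
-- 'sequence[s]' is ported with pyGetD: inside Pre_ every first boundary component is a valid
-- non-negative index, where pyGetD is exact; on the empty sequence Python B raises IndexError
-- (excluded by Pre_, like A).
def count_homorepeats_in_seq_alt (result_dict : List (String × List (Int × Int))) (sequence : String) (extreme : Int) : List (String × Int) :=
  let l := sequence.toList
  let n : Int := l.length
  let breaks : List Int :=
    0 :: ((PySem.List.enumerate (l.zip (l.drop 1))).filterMap
            (fun p => if p.2.1 ≠ p.2.2 then some (p.1 + 1) else none)) ++ [n]
  let runs : List (String × Int) :=
    (breaks.zip (breaks.drop 1)).map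
      (fun p => (String.ofList [PySem.List.pyGetD l p.1 ' '], p.2 - p.1))
  let _ := runs.foldl (fun rd r => pvBump rd r.1 r.2) result_dict   -- result_dict[char][length] += 1 pass (mutation only)
  runs.filter (fun r => decide (r.2 ≥ extreme))

-- ===== PRECONDITION & SPEC =====
-- Pre_ excludes exactly the inputs on which the Python A raises: the empty sequence
-- (IndexError on sequence[0]) and inputs whose result_dict lacks an entry for some character
-- c of the sequence or, in c's inner dict, for the length of some maximal run of c
-- (KeyError on '+= 1').  A maximal run is stated in closed form as an index pair (i, j):
-- constant inside, with differing (or absent) neighbours at both ends.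
def pvKeyOk (result_dict : List (String × List (Int × Int))) (c : Char) (k : Int) : Bool :=
  match result_dict.find? (fun q => q.1 == String.ofList [c]) with
  | none => false
  | some q => (q.2.find? (fun r => r.1 == k)).isSome

def Pre_count_homorepeats_in_seq (result_dict : List (String × List (Int × Int))) (sequence : String) (extreme : Int) : Prop :=
  sequence ≠ "" ∧
  ((List.range (sequence.toList.length + 1)).all (fun j =>
    (List.range j).all (fun i =>
      !((i == 0 || sequence.toList[i-1]? != sequence.toList[i]?) &&
        (j == sequence.toList.length || sequence.toList[j]? != sequence.toList[i]?) &&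
        (List.range j).all (fun t => !(decide (i ≤ t)) || sequence.toList[t]? == sequence.toList[i]?)) ||
      pvKeyOk result_dict (sequence.toList[i]!) ((j : Int) - (i : Int))))) = true
instance (result_dict : List (String × List (Int × Int))) (sequence : String) (extreme : Int) : Decidable (Pre_count_homorepeats_in_seq result_dict sequence extreme) := by unfold Pre_count_homorepeats_in_seq; infer_instance

def pvWitness_count_homorepeats_in_seq : (List (String × List (Int × Int))) × String × Int :=
  ([("a", [(1, 0), (2, 0)]), ("b", [(1, 3)])], "aab", 2)

def Spec_count_homorepeats_in_seq (result_dict : List (String × List (Int × Int))) (sequence : String) (extreme : Int) (out : List (String × Int)) : Prop := out = count_homorepeats_in_seq_alt result_dict sequence extreme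
instance (result_dict : List (String × List (Int × Int))) (sequence : String) (extreme : Int) (out : List (String × Int)) : Decidable (Spec_count_homorepeats_in_seq result_dict sequence extreme out) := by unfold Spec_count_homorepeats_in_seq; infer_instance

-- ===== CLAIM (what is proved, stated in full; the proofs are below) =====
def Claim_equal_count_homorepeats_in_seq : Prop := ∀ (result_dict : List (String × List (Int × Int))) (sequence : String) (extreme : Int), Dom_count_homorepeats_in_seq result_dict sequence extreme → Pre_count_homorepeats_in_seq result_dict sequence extreme → Spec_count_homorepeats_in_seq result_dict sequence extreme (count_homorepeats_in_seq result_dict sequence extreme)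

-- ===== LEMMAS AND PROOFS =====
-- the maximal runs of a list of characters, as (char, length) pairs (proof-side normal form)
def pvRuns : Char → Int → List Char → List (Char × Int)
  | c, n, [] => [(c, n)]
  | c, n, d :: rest => if d == c then pvRuns c (n + 1) rest else (c, n) :: pvRuns d 1 rest

-- proof-side abbreviations for B's boundary construction
def pvMid (s : Int) (u : List Char) : List Int :=
  (PySem.List.enumerate (u.zip (u.drop 1)) s).filterMap
    (fun p => if p.2.1 ≠ p.2.2 then some (p.1 + 1) else none)

def pvF (l : List Char) (p : Int × Int) : String × Int :=
  (String.ofList [PySem.List.pyGetD l p.1 ' '], p.2 - p.1)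

-- consecutive pairs of a boundary list (normal form of '(breaks).zip (breaks.drop 1)')
def pvPairs : Int → List Int → List (Int × Int)
  | _, [] => []
  | a, b :: t => (a, b) :: pvPairs b t

def pvRunsB (l : List Char) : List (String × Int) :=
  (pvPairs 0 (pvMid 0 l ++ [(l.length : Int)])).map (pvF l)

-- one-character strings are equal iff their characters are
theorem pvMkBeq (d c : Char) : (String.ofList [d] == String.ofList [c]) = (d == c) := by
  by_cases h : d = c
  · simp [h]
  · have hne : String.ofList [d] ≠ String.ofList [c] := by
      intro hm
      exact h (by simpa using congrArg String.toList hm)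
    simp [h, hne]

-- A's loop, finished by the trailing extreme check, equals a fold over the runs
theorem pvA_runs (extreme : Int) :
    ∀ (rest : List Char) (c : Char) (n : Int) (rd : List (String × List (Int × Int))) (ex : List (String × Int)),
      (let fin := rest.foldl (pvStepA extreme) (rd, String.ofList [c], n, ex)
       if fin.2.2.1 ≥ extreme then fin.2.2.2 ++ [(fin.2.1, fin.2.2.1)] else fin.2.2.2)
        = (pvRuns c n rest).foldl (fun ex p => if p.2 ≥ extreme then ex ++ [(String.ofList [p.1], p.2)] else ex) ex := by
  intro rest
  induction rest with
  | nil => intro c n rd ex; simp [pvRuns, List.foldl]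
  | cons d t ih =>
    intro c n rd ex
    by_cases h : d = c
    · subst h
      simpa [pvRuns, List.foldl, pvStepA, pvMkBeq] using ih d (n + 1) rd ex
    · simp only [pvRuns, List.foldl, pvStepA, pvMkBeq, beq_iff_eq, h, if_false]
      exact ih d 1 _ _

-- the first run of pvRuns carries the starting character
theorem pvRuns_head : ∀ (t : List Char) (c : Char) (n : Int), ∃ m r, pvRuns c n t = (c, m) :: r := by
  intro t
  induction t with
  | nil => intro c n; exact ⟨n, [], rfl⟩
  | cons d t' ih =>
    intro c n
    by_cases h : d = c
    · subst h; simpa [pvRuns] using ih d (n + 1)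
    · exact ⟨n, pvRuns d 1 t', by simp [pvRuns, h]⟩

-- incrementing the count parameter increments the first run's length
theorem pvRuns_inc : ∀ (t : List Char) (c : Char) (n m : Int) (r : List (Char × Int)),
    pvRuns c n t = (c, m) :: r → pvRuns c (n + 1) t = (c, m + 1) :: r := by
  intro t
  induction t with
  | nil =>
    intro c n m r h
    simp [pvRuns] at h ⊢
    exact ⟨by omega, h.2⟩
  | cons d t' ih =>
    intro c n m r h
    by_cases hd : d = c
    · subst hd
      simp only [pvRuns, beq_self_eq_true, if_true] at h ⊢
      exact ih d (n + 1) m r h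
    · simp [pvRuns, hd] at h ⊢
      exact ⟨by omega, h.2⟩

-- '(x :: B).zip B' is the consecutive-pair list
theorem pvZipAdj : ∀ (B : List Int) (x : Int), (x :: B).zip B = pvPairs x B := by
  intro B
  induction B with
  | nil => intro x; rfl
  | cons b t ih => intro x; simp [pvPairs, List.zip_cons_cons, ih b]

-- shifting the enumerate start by one shifts every produced index by one
theorem pvEnumShift {α : Type} : ∀ (xs : List α) (s : Int),
    PySem.List.enumerate xs (s + 1) = (PySem.List.enumerate xs s).map (fun p => (p.1 + 1, p.2)) := by
  intro xs
  induction xs with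
  | nil => intro s; simp [PySem.List.enumerate_nil]
  | cons x t ih => intro s; simp [PySem.List.enumerate_cons, ih (s + 1)]

-- shifting pvMid's start shifts every boundary by one
theorem pvMidShift (u : List Char) (s : Int) : pvMid (s + 1) u = (pvMid s u).map (· + 1) := by
  unfold pvMid
  rw [pvEnumShift, List.filterMap_map, List.map_filterMap]
  refine List.filterMap_congr (fun p _ => ?_)
  by_cases h : p.2.1 = p.2.2 <;> simp [h]

-- pvMid recurrences
theorem pvMid_single (s : Int) (c : Char) : pvMid s [c] = [] := by
  simp [pvMid, PySem.List.enumerate_nil]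

theorem pvMid_cons (s : Int) (c d : Char) (t : List Char) :
    pvMid s (c :: d :: t) = (if c ≠ d then [s + 1] else []) ++ pvMid (s + 1) (d :: t) := by
  unfold pvMid
  simp only [List.drop, List.zip_cons_cons, PySem.List.enumerate_cons, List.filterMap_cons]
  by_cases h : c = d <;> simp [h]

-- every boundary pvMid produces is greater than its start
theorem pvMid_pos (u : List Char) (s : Int) : ∀ x ∈ pvMid s u, s < x := by
  intro x hx
  unfold pvMid at hx
  rcases List.mem_filterMap.mp hx with ⟨p, hp, hfp⟩
  rcases (PySem.List.mem_enumerate_iff _ _ _).mp hp with ⟨k, hk, hpk⟩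
  have h1 : p.1 = s + (k : Int) := by rw [hpk]
  by_cases h : p.2.1 = p.2.2
  · simp [h] at hfp
  · simp [h] at hfp
    omega

-- first components of consecutive pairs come from the start or the list
theorem pvPairs_fst (a : Int) (B : List Int) : ∀ p ∈ pvPairs a B, p.1 = a ∨ p.1 ∈ B := by
  induction B generalizing a with
  | nil => intro p hp; cases hp
  | cons b t ih =>
    intro p hp
    simp only [pvPairs, List.mem_cons] at hp
    rcases hp with rfl | hp
    · exact Or.inl rfl
    · rcases ih b p hp with h | h
      · exact Or.inr (by simp [h])
      · exact Or.inr (List.mem_cons_of_mem _ h)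

-- pvPairs commutes with a uniform shift
theorem pvPairsShift (B : List Int) : ∀ (a : Int),
    pvPairs (a + 1) (B.map (· + 1)) = (pvPairs a B).map (fun p => (p.1 + 1, p.2 + 1)) := by
  induction B with
  | nil => intro a; rfl
  | cons b t ih => intro a; simp [pvPairs, ih b]

-- a shifted boundary-pair list maps through pvF of the extended list to the unshifted one
theorem pvShiftMap (Z : List (Int × Int)) (u : List Char) (c : Char)
    (hZ : ∀ p ∈ Z, 0 ≤ p.1) :
    (Z.map (fun p => (p.1 + 1, p.2 + 1))).map (pvF (c :: u)) = Z.map (pvF u) := by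
  rw [List.map_map]
  refine List.map_congr_left (fun p hp => ?_)
  have h0 : 0 ≤ p.1 := hZ p hp
  obtain ⟨m, hm⟩ : ∃ m : Nat, p.1 = (m : Int) := ⟨p.1.toNat, by omega⟩
  have h1 : ((m : Int) + 1) = ((m + 1 : Nat) : Int) := by push_cast; ring
  have hfst : PySem.List.pyGetD (c :: u) (p.1 + 1) ' ' = PySem.List.pyGetD u p.1 ' ' := by
    rw [hm, h1, PySem.List.pyGetD_natCast, PySem.List.pyGetD_natCast, List.getD_cons_succ]
  unfold pvF
  simp only [Function.comp]
  rw [hfst]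
  congr 1
  ring

-- the boundary list has non-negative entries
theorem pvB_nonneg (u : List Char) :
    ∀ x ∈ pvMid 0 u ++ [(u.length : Int)], 0 ≤ x := by
  intro x hx
  rcases List.mem_append.mp hx with h | h
  · exact le_of_lt (pvMid_pos u 0 x h)
  · simp at h; subst h; positivity

-- main lemma: B's boundary-pair runs are the maximal runs
theorem pvMain : ∀ (t : List Char) (c : Char),
    pvRunsB (c :: t) = (pvRuns c 1 t).map (fun p => (String.ofList [p.1], p.2)) := by
  intro t
  induction t with
  | nil =>
    intro c
    simp [pvRunsB, pvMid_single, pvRuns, pvPairs, pvF, PySem.List.pyGetD]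
  | cons d t' ih =>
    intro c
    -- the boundary list of the one-shorter list, decomposed
    obtain ⟨b, Bo, hB⟩ : ∃ b Bo, pvMid 0 (d :: t') ++ [((d :: t').length : Int)] = b :: Bo := by
      cases h : pvMid 0 (d :: t') with
      | nil => exact ⟨_, _, rfl⟩
      | cons x xs => exact ⟨_, _, rfl⟩
    have hBnn : ∀ x ∈ (b :: Bo : List Int), 0 ≤ x := hB ▸ pvB_nonneg (d :: t')
    have hlen : ((c :: d :: t').length : Int) = ((d :: t').length : Int) + 1 := by
      simp
    have hold : pvRunsB (d :: t')
        = pvF (d :: t') (0, b) :: (pvPairs b Bo).map (pvF (d :: t')) := by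
      unfold pvRunsB
      rw [hB]
      simp [pvPairs]
    by_cases hd : d = c
    · -- equal case: the head run grows by one
      subst hd
      have hnew : pvMid 0 (d :: d :: t') ++ [((d :: d :: t').length : Int)]
          = (b + 1) :: Bo.map (· + 1) := by
        rw [pvMid_cons, pvMidShift, hlen]
        simp only [ne_eq, not_true_eq_false]
        have : ((d :: t').length : Int) + 1 = ((d :: t').length : Int) + 1 := rfl
        calc (pvMid 0 (d :: t')).map (· + 1) ++ [((d :: t').length : Int) + 1]
            = ((pvMid 0 (d :: t') ++ [((d :: t').length : Int)]).map (· + 1)) := by simp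
          _ = (b :: Bo).map (· + 1) := by rw [hB]
          _ = (b + 1) :: Bo.map (· + 1) := by simp
      unfold pvRunsB
      rw [hnew]
      have hz : pvPairs 0 ((b + 1) :: Bo.map (· + 1))
          = (0, b + 1) :: (pvPairs b Bo).map (fun p => (p.1 + 1, p.2 + 1)) := by
        simp [pvPairs, pvPairsShift Bo b]
      rw [hz]
      have hnn : ∀ p ∈ pvPairs b Bo, 0 ≤ p.1 := by
        intro p hp
        rcases pvPairs_fst b Bo p hp with h | h
        · exact h ▸ hBnn b (by simp)
        · exact hBnn p.1 (List.mem_cons_of_mem _ h)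
      rw [List.map_cons, pvShiftMap _ (d :: t') d hnn]
      -- compare with the smaller instance
      obtain ⟨m, r, hpr⟩ := pvRuns_head t' d 1
      have hIH := ih d
      rw [hold, hpr] at hIH
      have hhead : pvF (d :: t') (0, b) = (String.ofList [d], b) := by
        simp [pvF, PySem.List.pyGetD_zero_cons]
      rw [hhead] at hIH
      obtain ⟨h1, h2⟩ := List.cons_eq_cons.mp hIH
      have hbm : b = m := ((Prod.mk.injEq _ _ _ _).mp h1).2
      have hrun2 : pvRuns d (1 + 1) t' = (d, m + 1) :: r := pvRuns_inc t' d 1 m r hpr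
      have hgoal : pvRuns d 1 (d :: t') = (d, m + 1) :: r := by
        simpa [pvRuns] using hrun2
      rw [hgoal]
      have hheadnew : pvF (d :: d :: t') (0, b + 1) = (String.ofList [d], b + 1) := by
        simp [pvF, PySem.List.pyGetD_zero_cons]
      rw [hheadnew, List.map_cons, h2, hbm]
    · -- unequal case: a fresh run of length one, the rest shifts
      have hnew : pvMid 0 (c :: d :: t') ++ [((c :: d :: t').length : Int)]
          = 1 :: (b + 1) :: Bo.map (· + 1) := by
        rw [pvMid_cons, pvMidShift, hlen]
        have hcd : c ≠ d := fun h => hd h.symm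
        simp only [ne_eq, hcd, not_false_eq_true, if_pos, List.cons_append, List.nil_append]
        congr 1
        calc (pvMid 0 (d :: t')).map (· + 1) ++ [((d :: t').length : Int) + 1]
            = ((pvMid 0 (d :: t') ++ [((d :: t').length : Int)]).map (· + 1)) := by simp
          _ = (b :: Bo).map (· + 1) := by rw [hB]
          _ = (b + 1) :: Bo.map (· + 1) := by simp
      unfold pvRunsB
      rw [hnew]
      have hz : pvPairs 0 (1 :: (b + 1) :: Bo.map (· + 1))
          = (0, 1) :: ((0, b) :: pvPairs b Bo).map (fun p => (p.1 + 1, p.2 + 1)) := by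
        have : pvPairs (0 + 1) ((b :: Bo).map (· + 1))
            = (pvPairs 0 (b :: Bo)).map (fun p => (p.1 + 1, p.2 + 1)) := pvPairsShift (b :: Bo) 0
        simp only [List.map_cons] at this
        simp [pvPairs]
        simpa [pvPairs] using congrArg List.tail this
      rw [hz]
      have hnn : ∀ p ∈ ((0, b) :: pvPairs b Bo : List (Int × Int)), 0 ≤ p.1 := by
        intro p hp
        rcases List.mem_cons.mp hp with rfl | hp
        · simp
        · rcases pvPairs_fst b Bo p hp with h | h
          · exact h ▸ hBnn b (by simp)
          · exact hBnn p.1 (List.mem_cons_of_mem _ h)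
      rw [List.map_cons, pvShiftMap _ (d :: t') c hnn]
      have hrest : ((0, b) :: pvPairs b Bo).map (pvF (d :: t')) = pvRunsB (d :: t') := by
        rw [hold]; rfl
      rw [hrest, ih d]
      have hheadnew : pvF (c :: d :: t') (0, 1) = (String.ofList [c], 1) := by
        simp [pvF, PySem.List.pyGetD_zero_cons]
      rw [hheadnew]
      have : pvRuns c 1 (d :: t') = (c, 1) :: pvRuns d 1 t' := by
        simp [pvRuns, hd]
      rw [this, List.map_cons]

-- a fold that conditionally appends is a filter
theorem pvFoldFilter (x : Int) : ∀ (l : List (Char × Int)) (ex : List (String × Int)),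
    l.foldl (fun ex p => if p.2 ≥ x then ex ++ [(String.ofList [p.1], p.2)] else ex) ex
      = ex ++ ((l.map (fun p => (String.ofList [p.1], p.2))).filter (fun r => decide (r.2 ≥ x))) := by
  intro l
  induction l with
  | nil => intro ex; simp
  | cons p t ih =>
    intro ex
    by_cases h : p.2 ≥ x <;> simp [List.foldl, h, ih]

-- ===== VERDICT (by name: the statement is the Claim_ definition above) =====
theorem count_homorepeats_in_seq_spec : Claim_equal_count_homorepeats_in_seq := by
  intro result_dict sequence extreme _dom pre
  unfold Spec_count_homorepeats_in_seq count_homorepeats_in_seq count_homorepeats_in_seq_alt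
  cases h : sequence.toList with
  | nil =>
    exact absurd (by simpa using congrArg String.ofList h) pre.1
  | cons c rest =>
    dsimp only
    rw [pvA_runs extreme rest c 1 result_dict [], pvFoldFilter, List.nil_append, ← pvMain rest c]
    simp only [List.drop_one, List.cons_append, List.tail_cons]
    rw [pvZipAdj]
    rfl
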